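-- pv_equiv track=rewrite | github.com/guilhermefaleiros/bin-packing | forca_bruta/decisao.py | bin_packing
-- ===== SOURCE A (Python) =====
-- from itertools import permutations
--
-- def bin_packing(items, bin_capacity, k):
--     # Calcula o número total de itens
--     n = len(items)
--     # Ordena os itens em ordem decrescente
--     items = sorted(items, reverse=True)
--
--     # Gera todas as permutações possíveis para organizar os itens
--     for bins in permutations(range(n)):
--         # Inicializa a capacidade de cada contêiner com a capacidade máxima
--         bin_capacities = [bin_capacity] * n
--         # Inicializa o contador de contêineres usados
--         bin_count = 0
--
--         # Itera sobre cada índice de item na permutação atual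
--         for item_index in bins:
--             # Obtém o item correspondente ao índice
--             item = items[item_index]
--             # Verifica se o item cabe em algum dos contêineres já abertos
--             for i in range(bin_count):
--                 # Se o item couber no contêiner, subtrai a capacidade do contêiner
--                 if bin_capacities[i] >= item:
--                     bin_capacities[i] -= item
--                     break
--             else:
--                 # Se o item não couber em nenhum contêiner, abre um novo contêiner
--                 bin_count += 1
--                 bin_capacities[bin_count - 1] -= item
--                 # Se o número de contêineres exceder k, a resposta é não
--                 if bin_count > k:
--                     break
--
--         # Se a permutação atual usar k contêineres ou menos, a resposta é sim
--         if bin_count <= k: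
--             return True
--
--     # Se todas as permutações foram testadas e nenhuma coube em k contêineres ou menos, a resposta é não
--     return False
-- ===== SOURCE B (Python) =====
-- def bin_packing(items, bin_capacity, k):
--     # Backtracking first-fit search with shared prefixes, branch pruning and
--     # duplicate-value skipping, instead of replaying first-fit on all n! permutations.
--     items = sorted(items, reverse=True)
--
--     def place(bins, x):
--         # first-fit: put x into the first open bin with enough remaining room,
--         # otherwise open a new bin for it
--         for i, b in enumerate(bins):
--             if b >= x:
--                 return bins[:i] + [b - x] + bins[i + 1:]
--         return bins + [bin_capacity - x]
--
--     # iterative greedy pass (the search's leftmost branch): if plain first-fit in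
--     # sorted order already needs at most k bins, the answer is True right away
--     bins = []
--     for x in items:
--         bins = place(bins, x)
--     if len(bins) <= k:
--         return True
--
--     def dfs(rem, bins):
--         if len(bins) > k:
--             return False
--         if not rem:
--             return True
--         for idx in range(len(rem)):
--             if idx > 0 and rem[idx] == rem[idx - 1]:
--                 continue
--             if dfs(rem[:idx] + rem[idx + 1:], place(bins, rem[idx])):
--                 return True
--         return False
--
--     return dfs(items, [])
-- ===== Notes on version B (the rewrite author's own statement) =====
-- stated objective: alternative
-- what changed: A lazily enumerates all n! index permutations and replays first-fit from scratch on a fixed-size capacity array for each; B is a backtracking depth-first search that threads the open-bin state incrementally, prunes any branch as soon as more than k bins are open, and skips duplicate item values at each choice point.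
import Mathlib
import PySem

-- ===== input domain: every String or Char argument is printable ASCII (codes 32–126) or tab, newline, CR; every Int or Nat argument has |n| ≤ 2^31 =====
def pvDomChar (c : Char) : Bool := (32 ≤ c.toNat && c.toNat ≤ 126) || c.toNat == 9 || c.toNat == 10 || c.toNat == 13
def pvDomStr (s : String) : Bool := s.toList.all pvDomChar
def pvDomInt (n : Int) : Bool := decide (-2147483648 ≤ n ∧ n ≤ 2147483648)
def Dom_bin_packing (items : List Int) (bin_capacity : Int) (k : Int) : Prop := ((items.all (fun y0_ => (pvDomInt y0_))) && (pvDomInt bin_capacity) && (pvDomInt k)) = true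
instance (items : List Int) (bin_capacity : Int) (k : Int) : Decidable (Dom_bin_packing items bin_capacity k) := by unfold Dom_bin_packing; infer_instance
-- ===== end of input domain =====

-- B replaces A's replay of first-fit over all n! index permutations by a
-- backtracking search that threads the open-bin state, prunes branches exceeding k bins
-- and skips duplicate item values.

-- ===== PORT A =====
-- inner 'for i in range(bin_count): if bin_capacities[i] >= item: ...; break' loop:
-- returns some(updated array) when the break fires, none when the loop falls through (for-else).
-- indices are provably in range, so xs[i] is ported with pyGetD (default never read).
def pvInnerA (arr : List Int) (x : Int) : List Int → Option (List Int)
  | [] => none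
  | i :: is =>
    if PySem.List.pyGetD arr i 0 ≥ x then
      some (arr.set i.toNat (PySem.List.pyGetD arr i 0 - x))
    else pvInnerA arr x is

-- one permutation's run: 'for item_index in bins: …' with the 'if bin_count > k: break';
-- returns the final bin_count.
def pvRunA (s : List Int) (c k : Int) : List Int → List Int → Int → Int
  | [], _arr, count => count
  | idx :: rest, arr, count =>
    let item := PySem.List.pyGetD s idx 0
    match pvInnerA arr item (PySem.List.pyRange 0 count 1) with
    | some arr' => pvRunA s c k rest arr' count
    | none =>
      let count' := count + 1
      let arr' := arr.set (count' - 1).toNat (PySem.List.pyGetD arr (count' - 1) 0 - item)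
      if count' > k then count' else pvRunA s c k rest arr' count'

-- 'for bins in permutations(range(n)): … return True' iterates a LAZY generator with an
-- early return: ported as the same lexicographic enumeration fused with a short-circuit
-- 'any' (pvPermAny f xs r = (PySem.List.permutations xs r).any f, proved below), so the
-- port, like Python, stops at the first successful permutation.
def pvPermAny (f : List Int → Bool) : List Int → Nat → Bool
  | _, 0 => f []
  | xs, r+1 => (List.range xs.length).any fun i =>
      match xs[i]? with
      | none => false
      | some x => pvPermAny (fun p => f (x :: p)) (xs.eraseIdx i) r

def bin_packing (items : List Int) (bin_capacity : Int) (k : Int) : Bool :=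
  let n := items.length
  let s := PySem.List.sorted items (fun x => x) true
  pvPermAny
    (fun p => decide (pvRunA s bin_capacity k p (List.replicate n bin_capacity) 0 ≤ k))
    (PySem.List.pyRange 0 (n : Int) 1) n

-- ===== PORT B =====
-- B's _place: first-fit a value into the open bins (list of remaining capacities),
-- opening a new bin at the end if no open bin has room.
def pvPlace (c : Int) : List Int → Int → List Int
  | [], x => [c - x]
  | b :: bs, x => if b ≥ x then (b - x) :: bs else b :: pvPlace c bs x

-- B's dfs: prune when more than k bins are open, succeed when nothing remains,
-- otherwise try each remaining item (skipping adjacent duplicates) as the next one placed.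
def pvDfsB (c k : Int) (rem bins : List Int) : Bool :=
  if ((bins.length : Int) > k) then false
  else if _hrem : rem = [] then true
  else
    (List.range rem.length).attach.any fun ⟨idx, _hidx⟩ =>
      if 0 < idx ∧ rem.getD idx 0 = rem.getD (idx - 1) 0 then false
      else pvDfsB c k (rem.eraseIdx idx) (pvPlace c bins (rem.getD idx 0))
termination_by rem.length
decreasing_by
  have hlt : idx < rem.length := List.mem_range.mp _hidx
  simp [List.length_eraseIdx, hlt]
  omega

def bin_packing_alt (items : List Int) (bin_capacity : Int) (k : Int) : Bool :=
  let s := PySem.List.sorted items (fun x => x) true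
  -- iterative greedy pass: first-fit in sorted order, True right away if ≤ k bins
  let bins := s.foldl (fun bins x => pvPlace bin_capacity bins x) []
  if (bins.length : Int) ≤ k then true
  else pvDfsB bin_capacity k s []

-- ===== PRECONDITION & SPEC =====
def Spec_bin_packing (items : List Int) (bin_capacity : Int) (k : Int) (out : Bool) : Prop := out = bin_packing_alt items bin_capacity k
instance (items : List Int) (bin_capacity : Int) (k : Int) (out : Bool) : Decidable (Spec_bin_packing items bin_capacity k out) := by unfold Spec_bin_packing; infer_instance

-- ===== CLAIM (what is proved, stated in full; the proofs are below) =====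
def Claim_equal_bin_packing : Prop := ∀ (items : List Int) (bin_capacity : Int) (k : Int), Dom_bin_packing items bin_capacity k → Spec_bin_packing items bin_capacity k (bin_packing items bin_capacity k)

-- ===== LEMMAS AND PROOFS =====

-- ---- proof-side helpers ----

-- first-fit WITHIN the open bins only: some = a bin had room, none = for-else fell through
def pvPlaceIn : List Int → Int → Option (List Int)
  | [], _ => none
  | b :: bs, x => if b ≥ x then some ((b - x) :: bs) else Option.map (b :: ·) (pvPlaceIn bs x)

-- pure selection search: same recursion tree as pvDfsB but with no pruning and no duplicate skip
def pvSel (c k : Int) (rem bins : List Int) : Bool :=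
  if _hrem : rem = [] then decide ((bins.length : Int) ≤ k)
  else
    (List.range rem.length).attach.any fun ⟨idx, _hidx⟩ =>
      pvSel c k (rem.eraseIdx idx) (pvPlace c bins (rem.getD idx 0))
termination_by rem.length
decreasing_by
  have hlt : idx < rem.length := List.mem_range.mp _hidx
  simp [List.length_eraseIdx, hlt]
  omega

theorem pvPlace_eq (c : Int) (bins : List Int) (x : Int) :
    pvPlace c bins x = (pvPlaceIn bins x).getD (bins ++ [c - x]) := by
  induction bins with
  | nil => simp [pvPlace, pvPlaceIn]
  | cons b bs ih =>
    by_cases h : b ≥ x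
    · simp [pvPlace, pvPlaceIn, h]
    · simp only [pvPlace, pvPlaceIn, if_neg h, ih]
      cases pvPlaceIn bs x <;> simp

theorem pvPlaceIn_length (bins : List Int) (x : Int) {caps' : List Int}
    (h : pvPlaceIn bins x = some caps') : caps'.length = bins.length := by
  induction bins generalizing caps' with
  | nil => simp [pvPlaceIn] at h
  | cons b bs ih =>
    by_cases hb : b ≥ x
    · simp [pvPlaceIn, hb] at h; subst h; simp
    · simp only [pvPlaceIn, if_neg hb, Option.map_eq_some_iff] at h
      obtain ⟨cs, hcs, rfl⟩ := h
      simp [ih hcs]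

theorem pvPlace_length_le (c : Int) (bins : List Int) (x : Int) :
    bins.length ≤ (pvPlace c bins x).length := by
  rw [pvPlace_eq]
  cases h : pvPlaceIn bins x with
  | none => simp
  | some caps' => simp [pvPlaceIn_length bins x h]

theorem pvFoldl_place_length_le (c : Int) (q bins : List Int) :
    bins.length ≤ (q.foldl (pvPlace c) bins).length := by
  induction q generalizing bins with
  | nil => simp
  | cons x q ih => exact le_trans (pvPlace_length_le c bins x) (ih _)

theorem pvAttach_any (n : Nat) (g : Nat → Bool) :
    (List.range n).attach.any (fun x => g x.1) = (List.range n).any g := by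
  conv_rhs => rw [← List.attach_map_subtype_val (List.range n)]
  rw [List.any_map]; rfl

-- erasing either of two adjacent equal entries gives the same list
theorem pvEraseIdx_dup : ∀ (l : List Int) (idx : Nat), 0 < idx → idx < l.length →
    l.getD idx 0 = l.getD (idx - 1) 0 → l.eraseIdx idx = l.eraseIdx (idx - 1) := by
  intro l
  induction l with
  | nil => intro idx _ h; simp at h
  | cons a t ih =>
    intro idx hpos hlt heq
    match idx, hpos with
    | 1, _ =>
      cases t with
      | nil => simp at hlt
      | cons b t' => simp_all
    | (j+2), _ =>
      have hlt' : j + 1 < t.length := by simpa using hlt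
      have heq' : t.getD (j+1) 0 = t.getD j 0 := by simpa using heq
      have := ih (j+1) (by omega) hlt' (by simpa using heq')
      simp only [List.eraseIdx_cons_succ]
      have h2 : (j + 2) - 1 = (j + 1) := rfl
      rw [h2, List.eraseIdx_cons_succ, this]
      congr 1

-- ---- B side: dfs = pure selection ----

theorem pvSel_le (c k : Int) : ∀ (n : Nat) (rem bins : List Int), rem.length = n →
    pvSel c k rem bins = true → (bins.length : Int) ≤ k := by
  intro n
  induction n using Nat.strong_induction_on with
  | _ n ih =>
    intro rem bins hlen hsel
    rw [pvSel] at hsel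
    by_cases hrem : rem = []
    · simpa [hrem] using hsel
    · rw [dif_neg hrem, List.any_eq_true] at hsel
      obtain ⟨⟨idx, hidx⟩, _, hx⟩ := hsel
      have hlt : idx < rem.length := List.mem_range.mp hidx
      have hlen' : (rem.eraseIdx idx).length < n := by
        rw [← hlen]; simp [List.length_eraseIdx, hlt]; omega
      have := ih _ hlen' (rem.eraseIdx idx) _ rfl hx
      have hmono := pvPlace_length_le c bins (rem.getD idx 0)
      omega

theorem pvSel_false_of_gt (c k : Int) (rem bins : List Int)
    (h : (bins.length : Int) > k) : pvSel c k rem bins = false := by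
  cases hsel : pvSel c k rem bins with
  | false => rfl
  | true => exact absurd (pvSel_le c k rem.length rem bins rfl hsel) (by omega)

theorem pvAny_skip (n : Nat) (G : Nat → Bool) (dup : Nat → Prop) [DecidablePred dup]
    (h : ∀ i, i < n → dup i → 0 < i ∧ G i = G (i - 1)) :
    ((List.range n).any fun i => if dup i then false else G i) = (List.range n).any G := by
  -- find a non-skipped witness by walking left through the run of equal values
  have key : ∀ i, i < n → G i = true → ∃ x, x < n ∧ (if dup x then false else G x) = true := by
    intro i
    induction i using Nat.strong_induction_on with
    | _ i ih =>
      intro hi hG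
      by_cases hd : dup i
      · obtain ⟨hpos, hGe⟩ := h i hi hd
        exact ih (i - 1) (by omega) (by omega) (hGe ▸ hG)
      · exact ⟨i, hi, by simp [hd, hG]⟩
  apply Bool.eq_iff_iff.mpr
  simp only [List.any_eq_true, List.mem_range]
  constructor
  · rintro ⟨i, hi, hG⟩
    refine ⟨i, hi, ?_⟩
    by_cases hd : dup i <;> simp [hd] at hG
    exact hG
  · rintro ⟨i, hi, hG⟩
    obtain ⟨x, hx, hGx⟩ := key i hi hG
    exact ⟨x, hx, hGx⟩

theorem pvDfs_eq_sel (c k : Int) : ∀ (n : Nat) (rem bins : List Int), rem.length = n →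
    pvDfsB c k rem bins = pvSel c k rem bins := by
  intro n
  induction n using Nat.strong_induction_on with
  | _ n ih =>
    intro rem bins hlen
    rw [pvDfsB, pvSel]
    by_cases hgt : (bins.length : Int) > k
    · rw [if_pos hgt]
      by_cases hrem : rem = []
      · rw [dif_pos hrem]; simp; omega
      · rw [dif_neg hrem]
        have := pvSel_false_of_gt c k rem bins hgt
        rw [pvSel, dif_neg hrem] at this
        exact this.symm
    · rw [if_neg hgt]
      by_cases hrem : rem = []
      · rw [dif_pos hrem, dif_pos hrem]; simp; omega
      · rw [dif_neg hrem, dif_neg hrem]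
        rw [pvAttach_any rem.length
          (fun idx => if 0 < idx ∧ rem.getD idx 0 = rem.getD (idx - 1) 0 then false
            else pvDfsB c k (rem.eraseIdx idx) (pvPlace c bins (rem.getD idx 0))),
          pvAttach_any rem.length
          (fun idx => pvSel c k (rem.eraseIdx idx) (pvPlace c bins (rem.getD idx 0)))]
        have hstep : ∀ i ∈ List.range rem.length,
            (if 0 < i ∧ rem.getD i 0 = rem.getD (i - 1) 0 then false
              else pvDfsB c k (rem.eraseIdx i) (pvPlace c bins (rem.getD i 0)))
            = (if 0 < i ∧ rem.getD i 0 = rem.getD (i - 1) 0 then false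
              else pvSel c k (rem.eraseIdx i) (pvPlace c bins (rem.getD i 0))) := by
          intro i hi
          have hlt : i < rem.length := List.mem_range.mp hi
          have hrec := ih (rem.eraseIdx i).length
            (by rw [← hlen]; simp [List.length_eraseIdx, hlt]; omega)
            (rem.eraseIdx i) (pvPlace c bins (rem.getD i 0)) rfl
          by_cases hd : 0 < i ∧ rem.getD i 0 = rem.getD (i - 1) 0
          · rw [if_pos hd, if_pos hd]
          · rw [if_neg hd, if_neg hd, hrec]
        rw [PySem.List.any_congr_mem hstep]
        apply pvAny_skip rem.length _ (fun i => 0 < i ∧ rem.getD i 0 = rem.getD (i - 1) 0)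
        intro i hi hd
        obtain ⟨hpos, heq⟩ := hd
        refine ⟨hpos, ?_⟩
        rw [pvEraseIdx_dup rem i hpos hi heq, heq]

-- ---- A side: inner loop, per-permutation run ----

theorem pvInner_spec (x : Int) : ∀ (caps pre tail : List Int),
    pvInnerA (pre ++ caps ++ tail) x
      (PySem.List.pyRange (pre.length : Int) ((pre.length + caps.length : Nat) : Int) 1)
    = Option.map (fun caps' => pre ++ caps' ++ tail) (pvPlaceIn caps x) := by
  intro caps
  induction caps with
  | nil =>
    intro pre tail
    rw [PySem.List.pyRange_one_eq_nil (by simp)]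
    simp [pvInnerA, pvPlaceIn]
  | cons b bs ih =>
    intro pre tail
    rw [PySem.List.pyRange_one_cons (by push_cast [List.length_cons]; omega)]
    have hget : PySem.List.pyGetD (pre ++ (b :: bs) ++ tail) (pre.length : Int) 0 = b := by
      rw [PySem.List.pyGetD_of_nonneg _ _ (by positivity)]
      rw [List.getD_eq_getElem?_getD, List.append_assoc,
        List.getElem?_append_right (by simp)]
      simp
    rw [pvInnerA, hget]
    by_cases hb : b ≥ x
    · rw [if_pos hb]
      have hset : (pre ++ (b :: bs) ++ tail).set ((pre.length : Int)).toNat (b - x)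
          = pre ++ ((b - x) :: bs) ++ tail := by
        rw [Int.toNat_natCast, List.append_assoc, List.set_append_right _ _ (le_refl _),
          List.append_assoc]
        simp
      rw [hset]
      simp [pvPlaceIn, hb]
    · rw [if_neg hb]
      have harr : pre ++ (b :: bs) ++ tail = (pre ++ [b]) ++ bs ++ tail := by simp
      have hlen1 : ((pre ++ [b]).length : Int) = (pre.length : Int) + 1 := by simp
      have hlen2 : (((pre ++ [b]).length + bs.length : Nat) : Int)
          = ((pre.length + (b :: bs).length : Nat) : Int) := by push_cast; simp; omega
      have := ih (pre ++ [b]) tail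
      rw [hlen1, hlen2, ← harr] at this
      rw [this]
      simp only [pvPlaceIn, if_neg hb]
      cases pvPlaceIn bs x <;> simp

theorem pvRunA_cons_some (s : List Int) (c k idx count : Int) (rest : List Int)
    (arr arr' : List Int)
    (h : pvInnerA arr (PySem.List.pyGetD s idx 0) (PySem.List.pyRange 0 count 1) = some arr') :
    pvRunA s c k (idx :: rest) arr count = pvRunA s c k rest arr' count := by
  rw [pvRunA, h]

theorem pvRunA_cons_none (s : List Int) (c k idx count : Int) (rest : List Int)
    (arr : List Int)
    (h : pvInnerA arr (PySem.List.pyGetD s idx 0) (PySem.List.pyRange 0 count 1) = none) :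
    pvRunA s c k (idx :: rest) arr count =
      (if count + 1 > k then count + 1
        else pvRunA s c k rest
          (arr.set (count + 1 - 1).toNat
            (PySem.List.pyGetD arr (count + 1 - 1) 0 - PySem.List.pyGetD s idx 0))
          (count + 1)) := by
  rw [pvRunA, h]

theorem pvRunA_verdict (s : List Int) (c k : Int) :
    ∀ (q caps tail : List Int), (∀ b ∈ tail, b = c) → q.length ≤ tail.length →
    ((pvRunA s c k q (caps ++ tail) (caps.length : Int) ≤ k) ↔
      ((((q.map (fun idx => PySem.List.pyGetD s idx 0)).foldl (pvPlace c) caps).length : Int) ≤ k)) := by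
  intro q
  induction q with
  | nil => intro caps tail _ _; simp [pvRunA]
  | cons idx rest ih =>
    intro caps tail htail hle
    obtain ⟨t0, tail', rfl⟩ : ∃ t0 tail', tail = t0 :: tail' := by
      cases tail with
      | nil => simp at hle
      | cons t0 tail' => exact ⟨t0, tail', rfl⟩
    have ht0 : t0 = c := htail t0 (by simp)
    have hle' : rest.length ≤ tail'.length := by simpa using hle
    set item := PySem.List.pyGetD s idx 0 with hitem
    have hinner := pvInner_spec item caps [] (t0 :: tail')
    simp only [List.length_nil, List.nil_append, Nat.zero_add, Nat.cast_zero] at hinner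
    simp only [List.map_cons, List.foldl_cons]
    cases hpi : pvPlaceIn caps item with
    | some caps' =>
      rw [hpi] at hinner
      simp only [Option.map_some] at hinner
      have hclen : caps'.length = caps.length := pvPlaceIn_length caps item hpi
      have hplace : pvPlace c caps item = caps' := by
        rw [pvPlace_eq, hpi]; rfl
      rw [pvRunA_cons_some s c k idx _ rest _ _ (by rw [← hitem]; exact hinner), hplace]
      have := ih caps' (t0 :: tail') htail (by simp; omega)
      rw [hclen] at this
      exact this
    | none =>
      rw [hpi] at hinner
      simp only [Option.map_none] at hinner
      have hplace : pvPlace c caps item = caps ++ [c - item] := by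
        rw [pvPlace_eq, hpi]; rfl
      rw [pvRunA_cons_none s c k idx _ rest _ (by rw [← hitem]; exact hinner)]
      have h1 : ((caps.length : Int) + 1 - 1) = (caps.length : Int) := by ring
      have hgetc : PySem.List.pyGetD (caps ++ t0 :: tail') ((caps.length : Int) + 1 - 1) 0 = c := by
        rw [h1, PySem.List.pyGetD_of_nonneg _ _ (by positivity), Int.toNat_natCast,
          List.getD_eq_getElem?_getD, List.getElem?_append_right (le_refl _)]
        simp [ht0]
      have hset : (caps ++ t0 :: tail').set (((caps.length : Int) + 1 - 1)).toNat (c - item)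
          = (caps ++ [c - item]) ++ tail' := by
        rw [h1, Int.toNat_natCast, List.set_append_right _ _ (le_refl _)]
        simp
      rw [← hitem, hgetc, hset]
      by_cases hk : (caps.length : Int) + 1 > k
      · rw [if_pos hk]
        constructor
        · intro h; omega
        · intro h
          exfalso
          have hmono := pvFoldl_place_length_le c
            (rest.map (fun i => PySem.List.pyGetD s i 0)) (pvPlace c caps item)
          have hplen : (pvPlace c caps item).length = caps.length + 1 := by
            rw [hplace]; simp
          omega
      · rw [if_neg hk]
        have := ih (caps ++ [c - item]) tail' (fun b hb => htail b (by simp [hb])) hle'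
        have hlen2 : ((caps ++ [c - item]).length : Int) = (caps.length : Int) + 1 := by
          simp
        rw [hlen2] at this
        rw [hplace]
        exact this

-- ---- permutations search = pure selection ----

theorem pvPerm_sel (c k : Int) (val : Int → Int) :
    ∀ (r : Nat) (xs : List Int) (bins : List Int), xs.length = r →
    ((PySem.List.permutations xs r).any
      (fun p => decide (((p.foldl (fun st idx => pvPlace c st (val idx)) bins).length : Int) ≤ k)))
    = pvSel c k (xs.map val) bins := by
  intro r
  induction r with
  | zero =>
    intro xs bins hlen
    have hxs : xs = [] := List.eq_nil_of_length_eq_zero hlen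
    subst hxs
    rw [pvSel]
    simp [PySem.List.permutations]
  | succ r ih =>
    intro xs bins hlen
    have hxs : xs ≠ [] := by intro h; subst h; simp at hlen
    rw [PySem.List.permutations.eq_2, List.any_flatMap]
    rw [pvSel, dif_neg (by simpa using hxs)]
    rw [pvAttach_any (xs.map val).length
      (fun idx => pvSel c k ((xs.map val).eraseIdx idx)
        (pvPlace c bins ((xs.map val).getD idx 0)))]
    rw [List.length_map]
    apply PySem.List.any_congr_mem
    intro i hi
    have hlt : i < xs.length := List.mem_range.mp hi
    rw [List.getElem?_eq_getElem hlt]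
    simp only
    rw [List.any_map]
    have hstep : ∀ p : List Int,
        (fun p => decide (((p.foldl (fun st idx => pvPlace c st (val idx)) bins).length : Int) ≤ k))
          (xs[i] :: p)
        = (fun p => decide (((p.foldl (fun st idx => pvPlace c st (val idx))
            (pvPlace c bins (val xs[i]))).length : Int) ≤ k)) p := by
      intro p; simp
    have hcomp :
        ((fun p => decide (((p.foldl (fun st idx => pvPlace c st (val idx)) bins).length : Int) ≤ k))
          ∘ (fun p => xs[i] :: p))
        = (fun p => decide (((p.foldl (fun st idx => pvPlace c st (val idx))
            (pvPlace c bins (val xs[i]))).length : Int) ≤ k)) := by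
      funext p; simp
    rw [hcomp]
    rw [ih (xs.eraseIdx i) (pvPlace c bins (val xs[i]))
      (by simp [List.length_eraseIdx, hlt]; omega)]
    rw [List.eraseIdx_map]
    congr 2
    rw [List.getD_eq_getElem?_getD, List.getElem?_map, List.getElem?_eq_getElem hlt]
    rfl

-- ---- assembly ----

theorem pvPermAny_eq (r : Nat) : ∀ (xs : List Int) (f : List Int → Bool),
    pvPermAny f xs r = (PySem.List.permutations xs r).any f := by
  induction r with
  | zero => intro xs f; simp [pvPermAny, PySem.List.permutations]
  | succ r ih =>
    intro xs f
    rw [PySem.List.permutations.eq_2, List.any_flatMap, pvPermAny]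
    apply PySem.List.any_congr_mem
    intro i hi
    have hlt : i < xs.length := List.mem_range.mp hi
    rw [List.getElem?_eq_getElem hlt]
    simp only
    rw [List.any_map, ih]
    rfl

theorem pvMain (s : List Int) (c k : Int) :
    pvPermAny
      (fun p => decide (pvRunA s c k p (List.replicate s.length c) 0 ≤ k))
      (PySem.List.pyRange 0 (s.length : Int) 1) s.length
    = pvSel c k s [] := by
  rw [pvPermAny_eq]
  have hidxlen : (PySem.List.pyRange 0 (s.length : Int) 1).length = s.length := by
    rw [PySem.List.length_pyRange_one]; omega
  -- step 1: each permutation's array run has the same verdict as the pure foldl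
  have hcongr : ∀ p ∈ PySem.List.permutations (PySem.List.pyRange 0 (s.length : Int) 1) s.length,
      (decide (pvRunA s c k p (List.replicate s.length c) 0 ≤ k))
      = (decide (((p.foldl (fun st idx => pvPlace c st (PySem.List.pyGetD s idx 0)) []).length : Int) ≤ k)) := by
    intro p hp
    have hp' : p ∈ PySem.List.permutations (PySem.List.pyRange 0 (s.length : Int) 1)
        ((PySem.List.pyRange 0 (s.length : Int) 1).length) := by
      rw [hidxlen]; exact hp
    have hperm := PySem.List.perm_of_mem_permutations hp'
    have hplen : p.length = s.length := by rw [hperm.length_eq, hidxlen]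
    have hiff := pvRunA_verdict s c k p [] (List.replicate s.length c)
      (fun b hb => List.eq_of_mem_replicate hb) (by simp [hplen])
    simp only [List.nil_append, List.length_nil, Nat.cast_zero] at hiff
    rw [List.foldl_map] at hiff
    exact decide_eq_decide.mpr hiff
  rw [PySem.List.any_congr_mem hcongr]
  -- step 2: the permutation search is the pure selection over the value list
  rw [pvPerm_sel c k (fun idx => PySem.List.pyGetD s idx 0) s.length
    (PySem.List.pyRange 0 (s.length : Int) 1) [] hidxlen]
  -- step 3: indexing the whole of s along 0..n-1 gives back s
  have hmap : (PySem.List.pyRange 0 (s.length : Int) 1).map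
      (fun idx => PySem.List.pyGetD s idx 0) = s := by
    have hlen : (s.length : Int) = PySem.List.len s := by simp [PySem.List.len_eq]
    rw [hlen]
    exact PySem.List.map_pyGetD_pyRange_zero s 0
  rw [hmap]

-- the greedy pass is the search's leftmost branch: its success implies the search succeeds
theorem pvSel_of_greedy (c k : Int) :
    ∀ (rem bins : List Int), (((rem.foldl (pvPlace c) bins).length : Int) ≤ k) →
    pvSel c k rem bins = true := by
  intro rem
  induction rem with
  | nil => intro bins h; rw [pvSel]; simpa using h
  | cons x rs ih =>
    intro bins h
    rw [pvSel, dif_neg (by simp)]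
    rw [List.any_eq_true]
    refine ⟨⟨0, by simp⟩, List.mem_attach _ _, ?_⟩
    simp only [List.eraseIdx_cons_zero, List.getD_cons_zero]
    exact ih (pvPlace c bins x) (by simpa using h)

theorem pvBMain (s : List Int) (c k : Int) :
    (if (((s.foldl (fun bins x => pvPlace c bins x) []).length : Int) ≤ k) then true
      else pvDfsB c k s []) = pvSel c k s [] := by
  by_cases h : ((s.foldl (fun bins x => pvPlace c bins x) []).length : Int) ≤ k
  · rw [if_pos h]
    exact (pvSel_of_greedy c k s [] h).symm
  · rw [if_neg h]
    exact pvDfs_eq_sel c k s.length s [] rfl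

theorem pvA_eq_B (items : List Int) (c k : Int) :
    bin_packing items c k = bin_packing_alt items c k := by
  show pvPermAny
      (fun p => decide (pvRunA (PySem.List.sorted items (fun x => x) true) c k p
        (List.replicate items.length c) 0 ≤ k))
      (PySem.List.pyRange 0 (items.length : Int) 1) items.length
    = (if ((((PySem.List.sorted items (fun x => x) true).foldl
          (fun bins x => pvPlace c bins x) []).length : Int) ≤ k) then true
        else pvDfsB c k (PySem.List.sorted items (fun x => x) true) [])
  generalize hs : PySem.List.sorted items (fun x => x) true = s
  have hslen : items.length = s.length := by rw [← hs, PySem.List.length_sorted]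
  rw [hslen]
  exact (pvMain s c k).trans (pvBMain s c k).symm

-- ===== VERDICT (by name: the statement is the Claim_ definition above) =====
theorem bin_packing_spec : Claim_equal_bin_packing := by
  intro items bin_capacity k _
  unfold Spec_bin_packing
  exact pvA_eq_B items bin_capacity k
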